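-- pv_equiv track=rewrite | github.com/lauramarioni/Projects | Drug consumption/drug_consumption_analysis.py | pre_df
-- ===== SOURCE A (Python) =====
-- def pre_df(df):
--     df= [s.replace("CL0", "0") for s in df]
--     df= [s.replace("CL1", "0") for s in df]
--     df= [s.replace("CL2", "0") for s in df]
--     df= [s.replace("CL3", "1") for s in df]
--     df= [s.replace("CL4", "1") for s in df]
--     df= [s.replace("CL5", "1") for s in df]
--     df= [s.replace("CL6", "1") for s in df]
--     return df
-- ===== SOURCE B (Python) =====
-- def _binarize(s):
--     # one left-to-right scan: each "CL<d>" (d in 0..6) becomes '0' (d<=2) or '1' (d>=3)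
--     out = []
--     i = 0
--     n = len(s)
--     while i < n:
--         if s[i] == 'C' and i + 2 < n and s[i + 1] == 'L' and 48 <= ord(s[i + 2]) <= 54:
--             out.append('0' if ord(s[i + 2]) <= 50 else '1')
--             i += 3
--         else:
--             out.append(s[i])
--             i += 1
--     return ''.join(out)
--
--
-- def pre_df(df):
--     return [_binarize(s) for s in df]
-- ===== Notes on version B (the rewrite author's own statement) =====
-- stated objective: alternative
-- what changed: B replaces A's seven successive whole-list str.replace passes (one per code CL0..CL6) by a single left-to-right scan of each string that classifies the digit after each 'CL' once.
import Mathlib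
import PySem

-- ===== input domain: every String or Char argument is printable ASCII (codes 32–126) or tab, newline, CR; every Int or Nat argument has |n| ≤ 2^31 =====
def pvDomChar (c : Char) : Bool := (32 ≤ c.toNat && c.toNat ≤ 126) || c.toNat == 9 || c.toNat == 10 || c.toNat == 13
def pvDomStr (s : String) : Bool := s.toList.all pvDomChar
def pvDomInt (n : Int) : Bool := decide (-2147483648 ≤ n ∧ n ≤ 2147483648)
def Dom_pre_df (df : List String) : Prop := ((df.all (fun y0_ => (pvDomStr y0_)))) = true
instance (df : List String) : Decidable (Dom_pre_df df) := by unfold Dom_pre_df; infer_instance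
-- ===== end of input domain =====

-- B replaces A's seven successive whole-list str.replace passes by one single left-to-right
-- scan per string (alternative decomposition; same observable result, no speed claim).

-- ===== PORT A =====
-- seven successive list comprehensions, each a full replace pass (literal transliteration)
def pre_df (df : List String) : List String :=
  let df1 := df.map (fun s => PySem.Str.replace s "CL0" "0")
  let df2 := df1.map (fun s => PySem.Str.replace s "CL1" "0")
  let df3 := df2.map (fun s => PySem.Str.replace s "CL2" "0")
  let df4 := df3.map (fun s => PySem.Str.replace s "CL3" "1")
  let df5 := df4.map (fun s => PySem.Str.replace s "CL4" "1")
  let df6 := df5.map (fun s => PySem.Str.replace s "CL5" "1")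
  let df7 := df6.map (fun s => PySem.Str.replace s "CL6" "1")
  df7

-- ===== PORT B =====
-- Source B's while loop of _binarize, as recursion on the characters still to scan:
-- at "C","L",d with 48 ≤ ord d ≤ 54 emit '0'/'1' and advance 3, else emit the char and advance 1
def pvBinarizeGo : List Char → List Char
  | [] => []
  | c :: l :: d :: u =>
      if c = 'C' ∧ l = 'L' ∧ 48 ≤ d.toNat ∧ d.toNat ≤ 54 then
        (if d.toNat ≤ 50 then '0' else '1') :: pvBinarizeGo u
      else c :: pvBinarizeGo (l :: d :: u)
  | c :: t => c :: pvBinarizeGo t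

-- ''.join(out) at the end of _binarize
def pvBinarize (s : String) : String := String.ofList (pvBinarizeGo s.toList)

def pre_df_alt (df : List String) : List String := df.map (fun s => pvBinarize s)

-- ===== PRECONDITION & SPEC =====
def Spec_pre_df (df : List String) (out : List String) : Prop := out = pre_df_alt df
instance (df : List String) (out : List String) : Decidable (Spec_pre_df df out) := by unfold Spec_pre_df; infer_instance

-- ===== CLAIM (what is proved, stated in full; the proofs are below) =====
def Claim_equal_pre_df : Prop := ∀ (df : List String), Dom_pre_df df → Spec_pre_df df (pre_df df)

-- ===== LEMMAS AND PROOFS =====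

-- one replace pass with pattern ['C','L',d] and replacement [o], as direct recursion
def pvRepCL (d o : Char) : List Char → List Char
  | [] => []
  | c :: l :: d' :: u =>
      if c = 'C' ∧ l = 'L' ∧ d' = d then o :: pvRepCL d o u
      else c :: pvRepCL d o (l :: d' :: u)
  | c :: t => c :: pvRepCL d o t

-- result of the passes CL0 … CLj (0 ≤ j ≤ 6) combined: fire on digits 48 … 48+j
def pvG (j : Nat) : List Char → List Char
  | [] => []
  | c :: l :: d :: u =>
      if c = 'C' ∧ l = 'L' ∧ 48 ≤ d.toNat ∧ d.toNat ≤ 48 + j then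
        (if d.toNat ≤ 50 then '0' else '1') :: pvG j u
      else c :: pvG j (l :: d :: u)
  | c :: t => c :: pvG j t

theorem pvChar_toNat_inj {a b : Char} (h : a.toNat = b.toNat) : a = b :=
  Char.ext (UInt32.toNat_inj.mp h)

theorem pvRepCL_fire (d o c l d' : Char) (u : List Char) (h : c = 'C' ∧ l = 'L' ∧ d' = d) :
    pvRepCL d o (c :: l :: d' :: u) = o :: pvRepCL d o u := by
  simp only [pvRepCL]; rw [if_pos h]

theorem pvRepCL_nofire (d o c l d' : Char) (u : List Char) (h : ¬(c = 'C' ∧ l = 'L' ∧ d' = d)) :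
    pvRepCL d o (c :: l :: d' :: u) = c :: pvRepCL d o (l :: d' :: u) := by
  simp only [pvRepCL]; rw [if_neg h]

theorem pvG_fire (j : Nat) (c l d : Char) (u : List Char)
    (h : c = 'C' ∧ l = 'L' ∧ 48 ≤ d.toNat ∧ d.toNat ≤ 48 + j) :
    pvG j (c :: l :: d :: u) = (if d.toNat ≤ 50 then '0' else '1') :: pvG j u := by
  simp only [pvG]; rw [if_pos h]

theorem pvG_nofire (j : Nat) (c l d : Char) (u : List Char)
    (h : ¬(c = 'C' ∧ l = 'L' ∧ 48 ≤ d.toNat ∧ d.toNat ≤ 48 + j)) :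
    pvG j (c :: l :: d :: u) = c :: pvG j (l :: d :: u) := by
  simp only [pvG]; rw [if_neg h]

theorem pvRepCL_cons_of_not (d o c : Char) (t : List Char)
    (h : ∀ l d' u, t = l :: d' :: u → ¬(c = 'C' ∧ l = 'L' ∧ d' = d)) :
    pvRepCL d o (c :: t) = c :: pvRepCL d o t := by
  match t with
  | [] => simp [pvRepCL]
  | [x] => simp [pvRepCL]
  | l :: d' :: u => exact pvRepCL_nofire d o c l d' u (h l d' u rfl)

theorem pvG_cons_of_not (j : Nat) (c : Char) (t : List Char)
    (h : ∀ l d u, t = l :: d :: u → ¬(c = 'C' ∧ l = 'L' ∧ 48 ≤ d.toNat ∧ d.toNat ≤ 48 + j)) :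
    pvG j (c :: t) = c :: pvG j t := by
  match t with
  | [] => simp [pvG]
  | [x] => simp [pvG]
  | l :: d :: u => exact pvG_nofire j c l d u (h l d u rfl)

-- PySem.Chars.replace.go for pattern ['C','L',d] / replacement [o] is pvRepCL
theorem pvRep_go (d o : Char) : ∀ (fuel : Nat) (l acc : List Char), l.length ≤ fuel →
    PySem.Chars.replace.go ['C','L',d] [o] fuel l acc = acc.reverse ++ pvRepCL d o l := by
  intro fuel
  induction fuel with
  | zero =>
    intro l acc h
    have : l = [] := by cases l <;> simp_all
    subst this
    rw [PySem.Chars.replace.go.eq_def]; simp [pvRepCL]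
  | succ n ih =>
    intro l acc h
    match l with
    | [] => rw [PySem.Chars.replace.go.eq_def]; simp [pvRepCL]
    | [c] =>
      rw [PySem.Chars.replace.go.eq_def]; dsimp only
      rw [if_neg (by simp [List.isPrefixOf])]
      rw [ih [] (c :: acc) (by simp)]
      simp [pvRepCL]
    | [c, x] =>
      rw [PySem.Chars.replace.go.eq_def]; dsimp only
      rw [if_neg (by simp [List.isPrefixOf])]
      rw [ih [x] (c :: acc) (by simp only [List.length_cons] at h ⊢; omega)]
      simp [pvRepCL]
    | c :: l' :: d' :: u =>
      have hlen : u.length + 3 ≤ n + 1 := by simpa using h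
      rw [PySem.Chars.replace.go.eq_def]; dsimp only
      by_cases hc : c = 'C' ∧ l' = 'L' ∧ d' = d
      · obtain ⟨h1, h2, h3⟩ := hc
        subst h1; subst h2; subst h3
        rw [if_pos (by simp [List.isPrefixOf])]
        rw [show List.drop (['C','L',d'] : List Char).length ('C' :: 'L' :: d' :: u) = u from rfl]
        rw [ih u ([o].reverse ++ acc) (by omega)]
        rw [pvRepCL_fire d' o 'C' 'L' d' u ⟨rfl, rfl, rfl⟩]
        simp
      · rw [if_neg (by
            simp only [List.isPrefixOf, Bool.and_eq_true, beq_iff_eq]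
            intro hpre
            exact hc ⟨hpre.1.symm, hpre.2.1.symm, hpre.2.2.1.symm⟩)]
        rw [ih (l' :: d' :: u) (c :: acc) (by simp only [List.length_cons] at h ⊢; omega)]
        rw [pvRepCL_nofire d o c l' d' u hc]
        simp

theorem pvRep_eq (d o : Char) (s : List Char) :
    PySem.Chars.replace s ['C','L',d] [o] = pvRepCL d o s := by
  have := pvRep_go d o s.length s [] le_rfl
  simpa [PySem.Chars.replace] using this

-- the head of pvG j s is the head of s, or an emitted '0', or an emitted '1' (then 3 ≤ j)
theorem pvG_head (j : Nat) (s : List Char) :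
    (pvG j s).head? = s.head? ∨
      ∃ h, (pvG j s).head? = some h ∧ (h = '0' ∨ (h = '1' ∧ 3 ≤ j)) := by
  match s with
  | [] => left; rfl
  | [c] => left; simp [pvG]
  | [c, x] => left; simp [pvG]
  | c :: l :: d :: u =>
    by_cases hf : c = 'C' ∧ l = 'L' ∧ 48 ≤ d.toNat ∧ d.toNat ≤ 48 + j
    · right
      refine ⟨if d.toNat ≤ 50 then '0' else '1', by rw [pvG_fire j c l d u hf]; rfl, ?_⟩
      split
      · left; rfl
      · right; exact ⟨rfl, by omega⟩
    · left; rw [pvG_nofire j c l d u hf]; rfl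

-- pass CL0 alone is pvG 0
theorem pvG_base : ∀ (n : Nat) (s : List Char), s.length ≤ n → pvRepCL '0' '0' s = pvG 0 s := by
  intro n
  induction n with
  | zero =>
    intro s h
    have : s = [] := by cases s <;> simp_all
    subst this; rfl
  | succ n ih =>
    intro s h
    match s with
    | [] => rfl
    | [c] => simp [pvRepCL, pvG]
    | [c, x] => simp [pvRepCL, pvG]
    | c :: l :: d :: u =>
      have hlen : u.length + 3 ≤ n + 1 := by simpa using h
      by_cases hf : c = 'C' ∧ l = 'L' ∧ d = '0'
      · rw [pvRepCL_fire '0' '0' c l d u hf]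
        rw [pvG_fire 0 c l d u ⟨hf.1, hf.2.1, by rw [hf.2.2]; exact ⟨by decide, by decide⟩⟩]
        rw [if_pos (by rw [hf.2.2]; decide)]
        rw [ih u (by omega)]
      · rw [pvRepCL_nofire '0' '0' c l d u hf]
        rw [pvG_nofire 0 c l d u (by
              intro ⟨h1, h2, h3, h4⟩
              exact hf ⟨h1, h2, pvChar_toNat_inj (by
                have h0 : ('0' : Char).toNat = 48 := rfl
                omega)⟩)]
        rw [ih (l :: d :: u) (by simp only [List.length_cons]; omega)]

-- applying pass CL(jp+1) to the result of passes CL0 … CLjp gives pvG (jp+1)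
theorem pvG_step (jp : Nat) (d o : Char) (hj : jp ≤ 5) (hd : d.toNat = 49 + jp)
    (ho : o = if d.toNat ≤ 50 then '0' else '1') :
    ∀ (n : Nat) (s : List Char), s.length ≤ n → pvRepCL d o (pvG jp s) = pvG (jp + 1) s := by
  intro n
  induction n with
  | zero =>
    intro s h
    have : s = [] := by cases s <;> simp_all
    subst this; rfl
  | succ n ih =>
    intro s h
    match s with
    | [] => rfl
    | [c] =>
      rw [show pvG jp [c] = [c] from by simp [pvG], show pvG (jp + 1) [c] = [c] from by simp [pvG]]
      simp [pvRepCL]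
    | [c, x] =>
      rw [show pvG jp [c, x] = [c, x] from by simp [pvG],
          show pvG (jp + 1) [c, x] = [c, x] from by simp [pvG]]
      simp [pvRepCL]
    | c :: l :: d' :: u =>
      have hlen : u.length + 3 ≤ n + 1 := by simpa using h
      by_cases hf1 : c = 'C' ∧ l = 'L' ∧ 48 ≤ d'.toNat ∧ d'.toNat ≤ 48 + jp
      · -- an earlier pass already fires here; its output digit is not 'C'
        rw [pvG_fire jp c l d' u hf1]
        rw [pvG_fire (jp + 1) c l d' u ⟨hf1.1, hf1.2.1, hf1.2.2.1, by omega⟩]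
        rw [pvRepCL_cons_of_not _ _ _ _ (by
              intro a b w heq hc
              have hC : (if d'.toNat ≤ 50 then '0' else '1') = 'C' := hc.1
              split at hC <;> simp_all)]
        rw [ih u (by omega)]
      · by_cases hf2 : c = 'C' ∧ l = 'L' ∧ d'.toNat = 49 + jp
        · -- exactly the new pass fires here: d' = d
          have hdd : d' = d := pvChar_toNat_inj (by omega)
          have e1 : pvG jp (c :: l :: d' :: u) = c :: l :: d' :: pvG jp u := by
            rw [pvG_nofire jp c l d' u hf1]
            rw [pvG_cons_of_not jp l (d' :: u) (by
                  rintro a b w ⟨⟩ hc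
                  have : l = 'C' := hc.1
                  rw [hf2.2.1] at this; exact absurd this (by decide))]
            rw [pvG_cons_of_not jp d' u (by
                  rintro a b w ⟨⟩ hc
                  have := congrArg Char.toNat hc.1
                  simp at this; omega)]
          rw [e1]
          rw [pvRepCL_fire d o c l d' (pvG jp u) ⟨hf2.1, hf2.2.1, hdd⟩]
          rw [ih u (by omega)]
          rw [pvG_fire (jp + 1) c l d' u ⟨hf2.1, hf2.2.1, by omega, by omega⟩]
          rw [ho, hdd]
        · -- no pass fires at this position
          rw [pvG_nofire jp c l d' u hf1]
          rw [pvG_nofire (jp + 1) c l d' u (by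
                intro ⟨h1, h2, h3, h4⟩
                rcases Nat.lt_or_ge d'.toNat (49 + jp) with hlt | hge
                · exact hf1 ⟨h1, h2, h3, by omega⟩
                · exact hf2 ⟨h1, h2, by omega⟩)]
          rw [pvRepCL_cons_of_not _ _ _ _ (by
                intro a b w heq hcnd
                obtain ⟨hcC, hlval, hdval⟩ := hcnd
                subst hcC
                rw [hlval, hdval] at heq
                -- pvG jp (l :: d' :: u) = 'L' :: d :: w : read off its first two characters
                have hL : l = 'L' := by
                  rcases pvG_head jp (l :: d' :: u) with hh | ⟨x, hx, hor⟩
                  · rw [heq] at hh; simpa using hh.symm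
                  · rw [heq] at hx; simp at hx
                    rcases hor with h0 | ⟨h1, _⟩ <;> simp_all
                have htl : pvG jp (l :: d' :: u) = 'L' :: pvG jp (d' :: u) := by
                  rw [pvG_cons_of_not jp l (d' :: u) (by
                        rintro a' b' w' ⟨⟩ hc'
                        have : l = 'C' := hc'.1
                        rw [hL] at this; exact absurd this (by decide))]
                  rw [hL]
                rw [htl] at heq
                have hheads : (pvG jp (d' :: u)).head? = some d := by
                  rw [List.cons.injEq] at heq
                  rw [heq.2]; rfl
                rcases pvG_head jp (d' :: u) with hh | ⟨x, hx, hor⟩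
                · rw [hheads] at hh
                  have hde : d' = d := by simpa using hh.symm
                  exact hf2 ⟨rfl, hL, by rw [hde]; omega⟩
                · rw [hheads] at hx
                  have hxd : x = d := by simpa using hx.symm
                  rcases hor with h0 | ⟨h1, hj3⟩
                  · rw [h0] at hxd
                    have := congrArg Char.toNat hxd
                    simp at this; omega
                  · rw [h1] at hxd
                    have := congrArg Char.toNat hxd
                    simp at this; omega)]
          rw [ih (l :: d' :: u) (by simp only [List.length_cons]; omega)]

-- pvG 6 is exactly B's scan
theorem pvG6_eq : ∀ (n : Nat) (s : List Char), s.length ≤ n → pvG 6 s = pvBinarizeGo s := by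
  intro n
  induction n with
  | zero =>
    intro s h
    have : s = [] := by cases s <;> simp_all
    subst this; rfl
  | succ n ih =>
    intro s h
    match s with
    | [] => rfl
    | [c] => simp [pvG, pvBinarizeGo]
    | [c, x] => simp [pvG, pvBinarizeGo]
    | c :: l :: d :: u =>
      have hlen : u.length + 3 ≤ n + 1 := by simpa using h
      by_cases hf : c = 'C' ∧ l = 'L' ∧ 48 ≤ d.toNat ∧ d.toNat ≤ 54
      · rw [show pvBinarizeGo (c :: l :: d :: u) =
              (if d.toNat ≤ 50 then '0' else '1') :: pvBinarizeGo u from by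
            simp only [pvBinarizeGo]; rw [if_pos hf]]
        rw [pvG_fire 6 c l d u ⟨hf.1, hf.2.1, hf.2.2.1, by omega⟩]
        rw [ih u (by omega)]
      · rw [show pvBinarizeGo (c :: l :: d :: u) = c :: pvBinarizeGo (l :: d :: u) from by
            simp only [pvBinarizeGo]; rw [if_neg hf]]
        rw [pvG_nofire 6 c l d u (by intro ⟨h1, h2, h3, h4⟩; exact hf ⟨h1, h2, h3, by omega⟩)]
        rw [ih (l :: d :: u) (by simp only [List.length_cons]; omega)]

-- the seven passes on one string equal B's single scan
theorem pv_per_string (s : String) :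
    PySem.Str.replace (PySem.Str.replace (PySem.Str.replace (PySem.Str.replace
      (PySem.Str.replace (PySem.Str.replace (PySem.Str.replace s "CL0" "0")
        "CL1" "0") "CL2" "0") "CL3" "1") "CL4" "1") "CL5" "1") "CL6" "1" = pvBinarize s := by
  simp only [PySem.Str.replace, String.toList_ofList]
  rw [show ("CL0" : String).toList = ['C','L','0'] from rfl,
      show ("CL1" : String).toList = ['C','L','1'] from rfl,
      show ("CL2" : String).toList = ['C','L','2'] from rfl,
      show ("CL3" : String).toList = ['C','L','3'] from rfl,
      show ("CL4" : String).toList = ['C','L','4'] from rfl,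
      show ("CL5" : String).toList = ['C','L','5'] from rfl,
      show ("CL6" : String).toList = ['C','L','6'] from rfl,
      show ("0" : String).toList = ['0'] from rfl,
      show ("1" : String).toList = ['1'] from rfl]
  simp only [pvRep_eq]
  rw [pvG_base s.toList.length s.toList le_rfl]
  rw [pvG_step 0 '1' '0' (by omega) (by decide) (by decide) s.toList.length s.toList le_rfl]
  rw [pvG_step 1 '2' '0' (by omega) (by decide) (by decide) s.toList.length s.toList le_rfl]
  rw [pvG_step 2 '3' '1' (by omega) (by decide) (by decide) s.toList.length s.toList le_rfl]
  rw [pvG_step 3 '4' '1' (by omega) (by decide) (by decide) s.toList.length s.toList le_rfl]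
  rw [pvG_step 4 '5' '1' (by omega) (by decide) (by decide) s.toList.length s.toList le_rfl]
  rw [pvG_step 5 '6' '1' (by omega) (by decide) (by decide) s.toList.length s.toList le_rfl]
  rw [pvG6_eq s.toList.length s.toList le_rfl]
  rfl

-- ===== VERDICT (by name: the statement is the Claim_ definition above) =====
theorem pre_df_spec : Claim_equal_pre_df := by
  intro df _
  unfold Spec_pre_df pre_df pre_df_alt
  simp only [List.map_map]
  refine List.map_congr_left (fun s _ => ?_)
  exact pv_per_string s
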